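-- pv_equiv track=rewrite | github.com/WforGodot/not-crypto | helper/alphametic_helpers.py | match_number_to_word
-- ===== SOURCE A (Python) =====
-- from typing import List, Dict, Tuple, Any
--
-- def match_number_to_word(number: str, word: str, current_map: Dict[str, str]) -> Dict[str, str]:
--     """Attempt to match a single number to a word using a given mapping, ensuring consistency."""
--     updated_map = current_map.copy()
--     for num_char, word_char in zip(number, word):
--         if num_char in updated_map:
--             if updated_map[num_char] != word_char:
--                 return None  # Mismatch in mapping
--         elif word_char in updated_map.values():
--             return None  # Reverse mapping conflict
--         updated_map[num_char] = word_char
--     return updated_map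
-- ===== SOURCE B (Python) =====
-- def match_number_to_word(number, word, current_map):
--     """Split the zipped pairs into existing vs new, validate each group, then merge."""
--     pairs = list(zip(number, word))
--     # 1. every pair whose num_char is already mapped must agree with the map
--     if any(current_map[n] != w for n, w in pairs if n in current_map):
--         return None
--     # 2. collect the genuinely new mappings (first occurrence wins), rejecting
--     #    a num_char that appears with two different word_chars
--     new_map = {}
--     for n, w in pairs:
--         if n not in current_map:
--             if n in new_map:
--                 if new_map[n] != w:
--                     return None
--             else:
--                 new_map[n] = w
--     # 3. new word_chars must be injective: distinct among themselves and unused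
--     new_vals = list(new_map.values())
--     if any(w in current_map.values() for w in new_vals):
--         return None
--     if len(set(new_vals)) != len(new_vals):
--         return None
--     # 4. merge
--     result = current_map.copy()
--     result.update(new_map)
--     return result
-- ===== Notes on version B (the rewrite author's own statement) =====
-- stated objective: alternative
-- what changed: B replaces A's single fold of one growing dict (reverse-conflict checked against the partly-updated map at each step) by a staged decomposition: verify the pairs whose num_char is already mapped, build a dict of only the new pairs with a consistency check, test the new word_chars for injectivity against the old values and among themselves, then merge once.
import Mathlib
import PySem

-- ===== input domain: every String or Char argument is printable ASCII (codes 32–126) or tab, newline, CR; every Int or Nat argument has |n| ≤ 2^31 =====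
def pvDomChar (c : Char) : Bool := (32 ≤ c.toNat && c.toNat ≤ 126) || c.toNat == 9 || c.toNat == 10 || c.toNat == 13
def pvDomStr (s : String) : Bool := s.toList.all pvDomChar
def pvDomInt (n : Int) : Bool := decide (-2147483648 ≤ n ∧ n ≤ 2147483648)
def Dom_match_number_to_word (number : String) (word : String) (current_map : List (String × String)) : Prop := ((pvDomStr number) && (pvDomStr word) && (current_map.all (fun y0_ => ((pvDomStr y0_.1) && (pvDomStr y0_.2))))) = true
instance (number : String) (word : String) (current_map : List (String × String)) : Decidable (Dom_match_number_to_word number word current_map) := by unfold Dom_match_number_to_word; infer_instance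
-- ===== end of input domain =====

-- B splits the zipped pairs into already-mapped vs new ones and validates each group in
-- separate passes (alternative decomposition, same cost); A folds one dict over the pairs.

-- zip(number, word): Python iterates strings as 1-character strings (shared marshalling step)
def pvZipPairs (number : String) (word : String) : List (String × String) :=
  (number.toList.zip word.toList).map (fun p => (String.singleton p.1, String.singleton p.2))

-- ===== PORT A =====
-- the loop of A: one dict threaded through the pairs; the getD default is never used
-- because the lookup is guarded by contains (Python indexes only inside 'if num_char in updated_map')
def matchGoA (m : PySem.Dict String String) : List (String × String) → Option (PySem.Dict String String)
  | [] => some m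
  | (nc, wc) :: rest =>
    if m.contains nc then
      if m.getD nc "" ≠ wc then none
      else matchGoA (m.insert nc wc) rest
    else if m.values.contains wc then none
    else matchGoA (m.insert nc wc) rest

def match_number_to_word (number : String) (word : String) (current_map : List (String × String)) : Option (List (String × String)) :=
  (matchGoA (PySem.Dict.mk current_map) (pvZipPairs number word)).map PySem.Dict.items

-- ===== PORT B =====
-- Source B's second pass: build the dict of new mappings, None on an inconsistent num_char
def buildNewB (nm : PySem.Dict String String) : List (String × String) → Option (PySem.Dict String String)
  | [] => some nm
  | (n, w) :: rest =>
    if nm.contains n then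
      if nm.getD n "" ≠ w then none
      else buildNewB nm rest
    else buildNewB (nm.insert n w) rest

def altCompute (d : PySem.Dict String String) (pairs : List (String × String)) : Option (PySem.Dict String String) :=
  -- 1. every pair whose num_char is already mapped must agree with the map
  if pairs.any (fun p => d.contains p.1 && d.getD p.1 "" ≠ p.2) then none
  else
    -- 2. the genuinely new pairs, first occurrence wins, consistency checked
    match buildNewB PySem.Dict.empty (pairs.filter (fun p => !(d.contains p.1))) with
    | none => none
    | some nm =>
      -- 3. new word_chars must be injective: unused and distinct among themselves
      if nm.values.any (fun w => d.values.contains w) then none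
      else if (PySem.Set.ofList nm.values).length ≠ nm.values.length then none
      else some (d.update nm.items)

def match_number_to_word_alt (number : String) (word : String) (current_map : List (String × String)) : Option (List (String × String)) :=
  (altCompute (PySem.Dict.mk current_map) (pvZipPairs number word)).map PySem.Dict.items

-- ===== PRECONDITION & SPEC =====
-- Pre_ excludes association lists with duplicate keys: those do not represent any Python
-- dict (current_map is a dict, whose keys are unique), so A is never run on them.
def Pre_match_number_to_word (number : String) (word : String) (current_map : List (String × String)) : Prop :=
  (current_map.map Prod.fst).Nodup
instance (number : String) (word : String) (current_map : List (String × String)) : Decidable (Pre_match_number_to_word number word current_map) := by unfold Pre_match_number_to_word; infer_instance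

def pvWitness_match_number_to_word : String × String × (List (String × String)) :=
  ("121", "aba", [("3", "c")])

def Spec_match_number_to_word (number : String) (word : String) (current_map : List (String × String)) (out : Option (List (String × String))) : Prop := out = match_number_to_word_alt number word current_map
instance (number : String) (word : String) (current_map : List (String × String)) (out : Option (List (String × String))) : Decidable (Spec_match_number_to_word number word current_map out) := by unfold Spec_match_number_to_word; infer_instance

-- ===== CLAIM (what is proved, stated in full; the proofs are below) =====
def Claim_equal_match_number_to_word : Prop := ∀ (number : String) (word : String) (current_map : List (String × String)), Dom_match_number_to_word number word current_map → Pre_match_number_to_word number word current_map → Spec_match_number_to_word number word current_map (match_number_to_word number word current_map)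

-- ===== LEMMAS AND PROOFS =====

-- lookups in a Dict.mk of an append whose prefix has no matching key skip the prefix
lemma get?_mk_append (pre xs : List (String × String)) (k : String)
    (h : ∀ p ∈ pre, p.1 ≠ k) :
    (PySem.Dict.mk (pre ++ xs)).get? k = (PySem.Dict.mk xs).get? k := by
  induction pre with
  | nil => rfl
  | cons p pre ih =>
    have hp : (p.1 == k) = false := by simpa using h p (by simp)
    rcases p with ⟨a, b⟩
    rw [List.cons_append, PySem.Dict.get?_mk_cons]
    simp only [hp]
    exact ih (fun q hq => h q (by simp [hq]))

-- so does contains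
lemma contains_mk_append (pre xs : List (String × String)) (k : String)
    (h : ∀ p ∈ pre, p.1 ≠ k) :
    (PySem.Dict.mk (pre ++ xs)).contains k = (PySem.Dict.mk xs).contains k := by
  simp only [PySem.Dict.contains, List.any_append]
  have : pre.any (fun p => p.1 == k) = false := by
    simp only [List.any_eq_false]
    intro p hp; simpa using h p hp
  simp [this]

-- a pair contradicting an entry already in nm makes buildNewB fail
lemma buildNew_none_of_mismatch (n w : String) (N : List (String × String)) : ∀ (nm : PySem.Dict String String),
    nm.get? n = some w → (∃ p ∈ N, p.1 = n ∧ p.2 ≠ w) → buildNewB nm N = none := by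
  induction N with
  | nil => rintro nm _ ⟨p, hp, _⟩; cases hp
  | cons q rest ih =>
    rintro nm hget ⟨p, hp, hp1, hp2⟩
    obtain ⟨a, b⟩ := q
    have hcn : nm.contains n = true := by rw [PySem.Dict.contains_eq_isSome_get?, hget]; rfl
    have hgd : nm.getD n "" = w := by rw [PySem.Dict.getD_eq_get?_getD, hget]; rfl
    simp only [buildNewB]
    by_cases ha : a = n
    · subst ha
      rw [if_pos hcn]
      by_cases hb : nm.getD a "" ≠ b
      · rw [if_pos hb]
      · rw [if_neg hb]
        push Not at hb
        have hbw : b = w := by rw [← hb, hgd]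
        rcases List.mem_cons.mp hp with hp | hp
        · exact absurd hbw (by simpa [hp] using hp2)
        · exact ih nm hget ⟨p, hp, hp1, hp2⟩
    · have hprest : p ∈ rest := by
        rcases List.mem_cons.mp hp with hp | hp
        · exact absurd (by simpa [hp] using hp1) ha
        · exact hp
      by_cases hca : nm.contains a
      · rw [if_pos hca]
        by_cases hb : nm.getD a "" ≠ b
        · rw [if_pos hb]
        · rw [if_neg hb]; exact ih nm hget ⟨p, hprest, hp1, hp2⟩
      · rw [if_neg hca]
        refine ih (nm.insert a b) ?_ ⟨p, hprest, hp1, hp2⟩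
        rw [PySem.Dict.get?_insert_of_ne _ _ (fun hh => ha hh.symm)]
        exact hget

-- pairs agreeing with an entry already in nm may be dropped
lemma buildNew_filter_key (n w : String) (N : List (String × String)) : ∀ (nm : PySem.Dict String String),
    nm.get? n = some w → (∀ p ∈ N, p.1 = n → p.2 = w) →
    buildNewB nm N = buildNewB nm (N.filter (fun p => !(p.1 == n))) := by
  induction N with
  | nil => intro nm _ _; rfl
  | cons q rest ih =>
    intro nm hget hall
    obtain ⟨a, b⟩ := q
    have hcn : nm.contains n = true := by rw [PySem.Dict.contains_eq_isSome_get?, hget]; rfl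
    have hgd : nm.getD n "" = w := by rw [PySem.Dict.getD_eq_get?_getD, hget]; rfl
    by_cases ha : a = n
    · subst ha
      have hb : b = w := hall (a, b) (by simp) rfl
      subst hb
      simp only [buildNewB, List.filter_cons, if_pos hcn, hgd, BEq.rfl, Bool.not_true]
      rw [if_neg (by simp)]
      simpa using ih nm hget (fun p hp h1 => hall p (by simp [hp]) h1)
    · have hne : (a == n) = false := by simpa using ha
      simp only [List.filter_cons, hne, Bool.not_false, if_pos]
      simp only [buildNewB]
      by_cases hca : nm.contains a
      · rw [if_pos hca, if_pos hca]
        by_cases hb : nm.getD a "" ≠ b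
        · rw [if_pos hb, if_pos hb]
        · rw [if_neg hb, if_neg hb]
          exact ih nm hget (fun p hp h1 => hall p (by simp [hp]) h1)
      · rw [if_neg hca, if_neg hca]
        refine ih (nm.insert a b) ?_ (fun p hp h1 => hall p (by simp [hp]) h1)
        rw [PySem.Dict.get?_insert_of_ne _ _ (fun hh => ha hh.symm)]
        exact hget

-- buildNewB never changes an entry that is already present
lemma buildNew_preserve (k : String) (N : List (String × String)) : ∀ (nm m : PySem.Dict String String),
    buildNewB nm N = some m → nm.contains k = true → m.get? k = nm.get? k := by
  induction N with
  | nil => intro nm m h _; cases h; rfl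
  | cons q rest ih =>
    intro nm m h hck
    obtain ⟨a, b⟩ := q
    simp only [buildNewB] at h
    by_cases hca : nm.contains a
    · rw [if_pos hca] at h
      by_cases hb : nm.getD a "" ≠ b
      · rw [if_pos hb] at h; cases h
      · rw [if_neg hb] at h; exact ih nm m h hck
    · rw [if_neg hca] at h
      have hak : a ≠ k := fun hh => by rw [hh] at hca; exact hca hck
      have := ih (nm.insert a b) m h (by rw [PySem.Dict.contains_insert]; simp [hck])
      rw [this, PySem.Dict.get?_insert_of_ne _ _ (fun hh => hak hh.symm)]

-- an untouched-key prefix just rides along through buildNewB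
lemma buildNew_delta (N : List (String × String)) : ∀ (pre : List (String × String)) (nm : PySem.Dict String String),
    (∀ p ∈ pre, ∀ q ∈ N, p.1 ≠ q.1) →
    buildNewB (PySem.Dict.mk (pre ++ nm.items)) N
      = (buildNewB nm N).map (fun m => PySem.Dict.mk (pre ++ m.items)) := by
  induction N with
  | nil => intro pre nm _; rfl
  | cons q rest ih =>
    intro pre nm hpre
    obtain ⟨a, b⟩ := q
    have hka : ∀ p ∈ pre, p.1 ≠ a := fun p hp => hpre p hp (a, b) (by simp)
    have hc : (PySem.Dict.mk (pre ++ nm.items)).contains a = nm.contains a := by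
      rw [contains_mk_append _ _ _ hka]
    have hg : (PySem.Dict.mk (pre ++ nm.items)).getD a "" = nm.getD a "" := by
      rw [PySem.Dict.getD_eq_get?_getD, PySem.Dict.getD_eq_get?_getD, get?_mk_append _ _ _ hka]
    simp only [buildNewB]
    by_cases hca : nm.contains a
    · rw [if_pos (by rw [hc]; exact hca), if_pos hca]
      by_cases hb : nm.getD a "" ≠ b
      · rw [if_pos (by rw [hg]; exact hb), if_pos hb]; rfl
      · rw [if_neg (by rw [hg]; exact hb), if_neg hb]
        exact ih pre nm (fun p hp q hq => hpre p hp q (by simp [hq]))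
    · rw [if_neg (by rw [hc]; exact hca), if_neg hca]
      have hins : (PySem.Dict.mk (pre ++ nm.items)).insert a b
          = PySem.Dict.mk (pre ++ (nm.insert a b).items) := by
        apply PySem.Dict.ext
        rw [PySem.Dict.items_insert_of_not_contains _ b (by rw [hc]; simpa using hca),
            PySem.Dict.items_insert_of_not_contains _ b (by simpa using hca)]
        simp [List.append_assoc]
      rw [hins]
      exact ih pre (nm.insert a b) (fun p hp q hq => hpre p hp q (by simp [hq]))

-- re-inserting the value a key already has is the identity (keys unique)
lemma insert_eq_self (d : PySem.Dict String String) (n w : String)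
    (hnd : d.keys.Nodup) (h : d.get? n = some w) : d.insert n w = d := by
  have hc : d.contains n = true := by
    rw [PySem.Dict.contains_eq_isSome_get?, h]; rfl
  apply PySem.Dict.ext
  rw [PySem.Dict.items_insert_of_contains d w hc]
  conv_rhs => rw [← List.map_id d.items]
  apply List.map_congr_left
  intro p hp
  by_cases hk : p.1 = n
  · have : d.get? p.1 = some p.2 := PySem.Dict.get?_of_mem_items d (by simpa using hp) hnd
    rw [hk] at this; rw [this] at h
    simp [hk, ← Option.some_inj.mp h, Prod.ext_iff]
  · simp [hk]

-- set(l) keeps the first occurrences in order, so it is a sublist of l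
lemma ofList_sublist (l : List String) : (PySem.Set.ofList l).Sublist l := by
  induction l with
  | nil => simp [PySem.Set.ofList_nil]
  | cons x xs ih =>
    rw [PySem.Set.ofList_cons]
    have h1 : ((PySem.Set.ofList xs).discard x).Sublist (PySem.Set.ofList xs) := by
      simp only [PySem.Set.discard]; exact List.filter_sublist
    exact List.Sublist.cons₂ x (h1.trans ih)

-- len(set(l)) == len(l) iff l has no duplicates
lemma ofList_length_iff (l : List String) :
    (PySem.Set.ofList l).length = l.length ↔ l.Nodup := by
  constructor
  · intro h
    have := List.Sublist.eq_of_length (ofList_sublist l) h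
    rw [← this]; exact PySem.Set.nodup_ofList l
  · intro h; rw [PySem.Set.ofList_eq_self_of_nodup _ h]

-- head pair contradicts an existing entry: B fails the consistency pass
lemma altCompute_head_mismatch (d : PySem.Dict String String) (n w : String)
    (rest : List (String × String)) (hcn : d.contains n = true) (hmis : d.getD n "" ≠ w) :
    altCompute d ((n, w) :: rest) = none := by
  unfold altCompute
  have hc : (((n, w) :: rest).any fun p => d.contains p.1 && decide (d.getD p.1 "" ≠ p.2)) = true := by
    rw [List.any_cons]; simp [hcn, hmis]
  rw [if_pos hc]

-- head pair agrees with an existing entry: B ignores it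
lemma altCompute_head_match (d : PySem.Dict String String) (n w : String)
    (rest : List (String × String)) (hcn : d.contains n = true) (hmis : d.getD n "" = w) :
    altCompute d ((n, w) :: rest) = altCompute d rest := by
  unfold altCompute
  have h1 : (((n, w) :: rest).any fun p => d.contains p.1 && decide (d.getD p.1 "" ≠ p.2))
      = (rest.any fun p => d.contains p.1 && decide (d.getD p.1 "" ≠ p.2)) := by
    rw [List.any_cons]; simp [hmis]
  have h2 : ((n, w) :: rest).filter (fun p => !d.contains p.1)
      = rest.filter (fun p => !d.contains p.1) := by
    rw [List.filter_cons]; simp [hcn]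
  rw [h1, h2]

-- head pair is new but its word_char is already used: B fails the injectivity pass
lemma altCompute_head_conflict (d : PySem.Dict String String) (n w : String)
    (rest : List (String × String)) (hcnf : d.contains n = false)
    (hw : d.values.contains w = true) :
    altCompute d ((n, w) :: rest) = none := by
  unfold altCompute
  by_cases hAE : (((n, w) :: rest).any fun p => d.contains p.1 && decide (d.getD p.1 "" ≠ p.2)) = true
  · rw [if_pos hAE]
  · rw [if_neg hAE]
    have h2 : ((n, w) :: rest).filter (fun p => !d.contains p.1)
        = (n, w) :: rest.filter (fun p => !d.contains p.1) := by
      rw [List.filter_cons]; simp [hcnf]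
    rw [h2]
    have h3 : buildNewB PySem.Dict.empty ((n, w) :: rest.filter (fun p => !d.contains p.1))
        = buildNewB (PySem.Dict.empty.insert n w) (rest.filter (fun p => !d.contains p.1)) := by
      simp [buildNewB]
    rw [h3]
    cases hbn : buildNewB (PySem.Dict.empty.insert n w)
        (rest.filter fun p => !d.contains p.1) with
    | none => rfl
    | some m =>
      have hm : m.get? n = some w := by
        rw [buildNew_preserve n _ _ m hbn (by rw [PySem.Dict.contains_insert]; simp)]
        exact PySem.Dict.get?_insert_self _ _ _
      have hwm : w ∈ m.values := by
        have hmem := PySem.Dict.mem_items_of_get?_eq_some m hm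
        simp only [PySem.Dict.values]
        exact List.mem_map.mpr ⟨(n, w), hmem, rfl⟩
      have hany : (m.values.any fun v => d.values.contains v) = true := by
        rw [List.any_eq_true]; exact ⟨w, hwm, hw⟩
      simp only [hany]
      simp

-- the new-key step: pushing a fresh, unconflicting pair into the base dict
lemma altCompute_insert (d : PySem.Dict String String) (n w : String) (rest : List (String × String))
    (hcnf : d.contains n = false) (hwf : d.values.contains w = false) :
    altCompute d ((n, w) :: rest) = altCompute (d.insert n w) rest := by
  have hvals' : (d.insert n w).values = d.values ++ [w] := by
    simp [PySem.Dict.values, PySem.Dict.items_insert_of_not_contains d w hcnf]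
  have hcont' : ∀ k, (d.insert n w).contains k = ((k == n) || d.contains k) :=
    fun k => PySem.Dict.contains_insert d n k w
  have hgetD' : ∀ k, (d.insert n w).getD k "" = if k = n then w else d.getD k "" :=
    fun k => PySem.Dict.getD_insert d n k w ""
  unfold altCompute
  have hhead : (((n, w) :: rest).any fun p => d.contains p.1 && decide (d.getD p.1 "" ≠ p.2))
      = (rest.any fun p => d.contains p.1 && decide (d.getD p.1 "" ≠ p.2)) := by
    rw [List.any_cons]; simp [hcnf]
  have hfilt : ((n, w) :: rest).filter (fun p => !d.contains p.1)
      = (n, w) :: rest.filter (fun p => !d.contains p.1) := by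
    rw [List.filter_cons]; simp [hcnf]
  have hE' : (rest.any fun p => (d.insert n w).contains p.1 && decide ((d.insert n w).getD p.1 "" ≠ p.2))
      = (rest.any fun p => (d.contains p.1 && decide (d.getD p.1 "" ≠ p.2)) || ((p.1 == n) && !(p.2 == w))) := by
    apply PySem.List.any_congr_mem
    intro p hp
    rcases p with ⟨a, b⟩
    by_cases hpn : a = n
    · subst hpn
      by_cases hb : b = w
      · simp [hb, hcont', hgetD', hcnf]
      · have hb1 : (b == w) = false := by simpa using hb
        have hb2 : decide (w = b) = false := decide_eq_false (fun h => hb h.symm)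
        simp [hcont', hgetD', hcnf, hb1, hb2]
    · have hpn' : (a == n) = false := by simpa using hpn
      simp [hcont', hgetD', hpn, hpn']
  have hsplit : (rest.any fun p => (d.contains p.1 && decide (d.getD p.1 "" ≠ p.2)) || ((p.1 == n) && !(p.2 == w)))
      = ((rest.any fun p => d.contains p.1 && decide (d.getD p.1 "" ≠ p.2)) || (rest.any fun p => (p.1 == n) && !(p.2 == w))) := by
    by_cases h : (rest.any fun p => (d.contains p.1 && decide (d.getD p.1 "" ≠ p.2)) || ((p.1 == n) && !(p.2 == w))) = true
    · rw [h]
      obtain ⟨p, hp, hpe⟩ := List.any_eq_true.mp h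
      rcases Bool.or_eq_true_iff.mp hpe with h' | h'
      · exact (Bool.or_eq_true_iff.mpr (Or.inl (List.any_eq_true.mpr ⟨p, hp, h'⟩))).symm
      · exact (Bool.or_eq_true_iff.mpr (Or.inr (List.any_eq_true.mpr ⟨p, hp, h'⟩))).symm
    · have hf : (rest.any fun p => (d.contains p.1 && decide (d.getD p.1 "" ≠ p.2)) || ((p.1 == n) && !(p.2 == w))) = false := by
        simpa using h
      rw [hf]
      have h1 : (rest.any fun p => d.contains p.1 && decide (d.getD p.1 "" ≠ p.2)) = false := by
        rw [List.any_eq_false]; intro p hp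
        exact ne_true_of_eq_false (Bool.or_eq_false_iff.mp (eq_false_of_ne_true (List.any_eq_false.mp hf p hp))).1
      have h2 : (rest.any fun p => (p.1 == n) && !(p.2 == w)) = false := by
        rw [List.any_eq_false]; intro p hp
        exact ne_true_of_eq_false (Bool.or_eq_false_iff.mp (eq_false_of_ne_true (List.any_eq_false.mp hf p hp))).2
      rw [h1, h2]; rfl
  rw [hhead, hfilt, hE', hsplit]
  have hNR : (rest.filter fun p => !(d.insert n w).contains p.1)
      = ((rest.filter fun p => !d.contains p.1).filter fun p => !(p.1 == n)) := by
    rw [List.filter_filter]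
    apply List.filter_congr
    intro p hp
    rw [hcont' p.1]
    simp [Bool.not_or, Bool.and_comm]
  rw [hNR]
  have hb0 : buildNewB PySem.Dict.empty ((n, w) :: rest.filter (fun p => !d.contains p.1))
      = buildNewB (PySem.Dict.empty.insert n w) (rest.filter (fun p => !d.contains p.1)) := by
    simp [buildNewB]
  rw [hb0]
  have hgetw : (PySem.Dict.empty.insert n w).get? n = some w :=
    PySem.Dict.get?_insert_self _ _ _
  by_cases hKany : (rest.any fun p => (p.1 == n) && !(p.2 == w)) = true
  · obtain ⟨p, hp, hpk⟩ := List.any_eq_true.mp hKany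
    obtain ⟨hp1, hp2⟩ := Bool.and_eq_true_iff.mp hpk
    have hp1' : p.1 = n := by simpa using hp1
    have hp2' : p.2 ≠ w := by simpa using hp2
    have hexists : ∃ q ∈ rest.filter (fun p => !d.contains p.1), q.1 = n ∧ q.2 ≠ w :=
      ⟨p, List.mem_filter.mpr ⟨hp, by rw [hp1', hcnf]; rfl⟩, hp1', hp2'⟩
    rw [buildNew_none_of_mismatch n w _ _ hgetw hexists, hKany]
    cases hAE : (rest.any fun p => d.contains p.1 && decide (d.getD p.1 "" ≠ p.2)) <;> simp [hAE]
  · have hKf : (rest.any fun p => (p.1 == n) && !(p.2 == w)) = false := eq_false_of_ne_true hKany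
    have hall : ∀ p ∈ rest.filter (fun p => !d.contains p.1), p.1 = n → p.2 = w := by
      intro p hp hp1
      have h0 := eq_false_of_ne_true (List.any_eq_false.mp hKf p (List.mem_filter.mp hp).1)
      rw [Bool.and_eq_false_iff] at h0
      rcases h0 with h0 | h0
      · exact absurd (by simpa using hp1) (by simpa using h0)
      · simpa using h0
    rw [buildNew_filter_key n w _ _ hgetw hall]
    have hdel : buildNewB (PySem.Dict.empty.insert n w)
          ((rest.filter fun p => !d.contains p.1).filter fun p => !(p.1 == n))
        = (buildNewB PySem.Dict.empty ((rest.filter fun p => !d.contains p.1).filter fun p => !(p.1 == n))).map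
            (fun m => PySem.Dict.mk ((n, w) :: m.items)) := by
      have hh : ∀ p ∈ ([(n, w)] : List (String × String)), ∀ q ∈ ((rest.filter fun p => !d.contains p.1).filter fun p => !(p.1 == n)), p.1 ≠ q.1 := by
        intro p hp q hq
        have hq1 : (q.1 == n) = false := by
          have := (List.mem_filter.mp hq).2
          simpa using this
        simp only [List.mem_singleton] at hp
        subst hp
        intro hcontra
        rw [← hcontra] at hq1
        simp at hq1
      simpa using buildNew_delta _ [(n, w)] PySem.Dict.empty hh
    rw [hdel]
    cases hm0 : buildNewB PySem.Dict.empty ((rest.filter fun p => !d.contains p.1).filter fun p => !(p.1 == n)) with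
    | none =>
      cases hAE : (rest.any fun p => d.contains p.1 && decide (d.getD p.1 "" ≠ p.2)) <;> simp [hAE, hKf]
    | some m0 =>
      cases hAE : (rest.any fun p => d.contains p.1 && decide (d.getD p.1 "" ≠ p.2)) with
      | true => simp [hAE]
      | false =>
        simp only [hAE, hKf, Bool.or_self, Bool.false_eq_true, if_false, Option.map_some]
        have hv1 : (PySem.Dict.mk ((n, w) :: m0.items)).values = w :: m0.values := rfl
        rw [hv1]
        by_cases hX : ∃ v ∈ m0.values, v ∈ d.values
        · obtain ⟨v, hv, hvd⟩ := hX
          have hc2L : ((w :: m0.values).any fun u => d.values.contains u) = true :=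
            List.any_eq_true.mpr ⟨v, by simp [hv], List.contains_iff_mem.mpr hvd⟩
          have hc2R : (m0.values.any fun u => (d.insert n w).values.contains u) = true :=
            List.any_eq_true.mpr ⟨v, hv, by rw [hvals']; exact List.contains_iff_mem.mpr (List.mem_append.mpr (Or.inl hvd))⟩
          rw [if_pos hc2L, if_pos hc2R]
        · have hXf : (m0.values.any fun u => d.values.contains u) = false := by
            rw [List.any_eq_false]; intro v hv
            cases hcv : d.values.contains v with
            | false => simp
            | true => exact absurd ⟨v, hv, List.contains_iff_mem.mp hcv⟩ hX
          have hc2L : ((w :: m0.values).any fun u => d.values.contains u) = false := by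
            rw [List.any_cons, hwf, hXf]; rfl
          by_cases hY : w ∈ m0.values
          · have hc2R : (m0.values.any fun u => (d.insert n w).values.contains u) = true :=
              List.any_eq_true.mpr ⟨w, hY, by rw [hvals']; exact List.contains_iff_mem.mpr (List.mem_append.mpr (Or.inr (by simp)))⟩
            have hc2L' : ¬(((w :: m0.values).any fun u => d.values.contains u) = true) := by
              rw [hc2L]; simp
            rw [if_neg hc2L', if_pos hc2R]
            have hlen : (PySem.Set.ofList (w :: m0.values)).length ≠ (w :: m0.values).length := by
              intro h
              exact (List.nodup_cons.mp ((ofList_length_iff _).mp h)).1 hY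
            rw [if_pos hlen]
          · have hc2R : (m0.values.any fun u => (d.insert n w).values.contains u) = false := by
              rw [List.any_eq_false]; intro v hv
              cases hcv : (d.insert n w).values.contains v with
              | false => simp
              | true =>
                exfalso
                rw [hvals'] at hcv
                rcases List.mem_append.mp (List.contains_iff_mem.mp hcv) with hl | hr
                · exact absurd ⟨v, hv, hl⟩ hX
                · rw [List.mem_singleton] at hr
                  rw [hr] at hv
                  exact hY hv
            have hc2L' : ¬(((w :: m0.values).any fun u => d.values.contains u) = true) := by
              rw [hc2L]; simp
            have hc2R' : ¬((m0.values.any fun u => (d.insert n w).values.contains u) = true) := by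
              rw [hc2R]; simp
            rw [if_neg hc2L', if_neg hc2R']
            by_cases hN0 : m0.values.Nodup
            · have hndL : (w :: m0.values).Nodup := List.nodup_cons.mpr ⟨hY, hN0⟩
              rw [if_neg (fun h => h ((ofList_length_iff _).mpr hndL)),
                if_neg (fun h => h ((ofList_length_iff _).mpr hN0))]
              rfl
            · rw [if_pos (fun h => hN0 (List.nodup_cons.mp ((ofList_length_iff _).mp h)).2),
                if_pos (fun h => hN0 ((ofList_length_iff _).mp h))]

-- the inductive heart: A's fold equals B's staged computation, for any dict with unique keys
lemma matchGoA_eq_altCompute (pairs : List (String × String)) : ∀ (d : PySem.Dict String String),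
    d.keys.Nodup → matchGoA d pairs = altCompute d pairs := by
  induction pairs with
  | nil => intro d _; rfl
  | cons q rest ih =>
    intro d hnd
    obtain ⟨n, w⟩ := q
    by_cases hcn : d.contains n = true
    · have hsome : ∃ v, d.get? n = some v := by
        rw [PySem.Dict.contains_eq_isSome_get?] at hcn
        exact Option.isSome_iff_exists.mp hcn
      obtain ⟨v, hv⟩ := hsome
      have hgd : d.getD n "" = v := PySem.Dict.getD_of_get?_eq_some d "" hv
      by_cases hmis : d.getD n "" = w
      · have hget : d.get? n = some w := by rw [hv, hgd.symm.trans hmis]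
        have hins : d.insert n w = d := insert_eq_self d n w hnd hget
        simp only [matchGoA]
        rw [if_pos hcn, if_neg (by simp [hmis]), hins, ih d hnd,
          altCompute_head_match d n w rest hcn hmis]
      · simp only [matchGoA]
        rw [if_pos hcn, if_pos (by simpa using hmis),
          altCompute_head_mismatch d n w rest hcn hmis]
    · have hcnf : d.contains n = false := by simpa using hcn
      by_cases hw : d.values.contains w = true
      · simp only [matchGoA]
        rw [if_neg (by simp [hcnf]), if_pos hw,
          altCompute_head_conflict d n w rest hcnf hw]
      · have hwf : d.values.contains w = false := by simpa using hw
        simp only [matchGoA]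
        rw [if_neg (by simp [hcnf]), if_neg (by rw [hwf]; simp),
          ih (d.insert n w) (PySem.Dict.nodup_keys_insert d n w hnd)]
        exact (altCompute_insert d n w rest hcnf hwf).symm

-- ===== VERDICT (by name: the statement is the Claim_ definition above) =====
theorem match_number_to_word_spec : Claim_equal_match_number_to_word := by
  intro number word current_map _hdom hpre
  unfold Spec_match_number_to_word match_number_to_word match_number_to_word_alt
  have hnd : (PySem.Dict.mk current_map).keys.Nodup := by
    simpa [PySem.Dict.keys_mk] using hpre
  rw [matchGoA_eq_altCompute _ _ hnd]
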